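-- pv_equiv track=rewrite | github.com/0xSero/reap-expert-swap | scripts/compact_offload.py | summarize_compact_delta
-- ===== SOURCE A (Python) =====
-- from typing import Iterable
--
-- def summarize_compact_delta(
--     previous_globals: Iterable[int] | None,
--     selected_globals: Iterable[int],
-- ) -> dict[str, int]:
--     previous = {int(value) for value in (previous_globals or [])}
--     current = {int(value) for value in selected_globals}
--     return {
--         "added_expert_total": len(current - previous),
--         "removed_expert_total": len(previous - current),
--         "reused_expert_total": len(previous & current),
--     }
-- ===== SOURCE B (Python) =====
-- def summarize_compact_delta(previous_globals, selected_globals):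
--     # One presence-tracking dict of bitmasks (1 = in previous, 2 = in selected),
--     # then a single classification pass over the masks.
--     flags = {}
--     for value in (previous_globals or []):
--         flags[int(value)] = 1
--     for value in selected_globals:
--         m = flags.get(int(value), 0)
--         flags[int(value)] = 3 if m % 2 == 1 else 2
--     added = removed = reused = 0
--     for m in flags.values():
--         if m == 3:
--             reused += 1
--         elif m == 2:
--             added += 1
--         else:
--             removed += 1
--     return {
--         "added_expert_total": added,
--         "removed_expert_total": removed,
--         "reused_expert_total": reused,
--     }
-- ===== Notes on version B (the rewrite author's own statement) =====
-- stated objective: alternative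
-- what changed: Replaces the two temporary sets and three set-algebra operations (difference, difference, intersection) with a single dict mapping each value to a presence bitmask (1 = previous, 2 = selected) and one classification pass over the masks that tallies added/removed/reused counters.
import Mathlib
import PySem

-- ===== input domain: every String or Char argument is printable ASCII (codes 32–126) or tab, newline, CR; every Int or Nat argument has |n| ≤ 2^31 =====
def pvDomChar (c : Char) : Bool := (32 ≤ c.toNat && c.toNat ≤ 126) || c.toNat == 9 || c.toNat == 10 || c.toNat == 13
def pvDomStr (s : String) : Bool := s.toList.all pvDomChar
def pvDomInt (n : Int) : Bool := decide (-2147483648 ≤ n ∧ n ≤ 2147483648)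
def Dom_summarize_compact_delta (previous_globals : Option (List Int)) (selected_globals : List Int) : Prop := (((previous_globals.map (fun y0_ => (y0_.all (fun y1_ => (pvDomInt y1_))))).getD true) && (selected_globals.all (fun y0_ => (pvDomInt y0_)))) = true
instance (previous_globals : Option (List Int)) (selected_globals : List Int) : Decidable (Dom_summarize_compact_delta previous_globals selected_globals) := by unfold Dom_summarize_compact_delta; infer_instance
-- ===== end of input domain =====

-- B replaces A's two sets and three set-algebra operations by one value→bitmask dict
-- (1 = in previous, 2 = in selected) and a single classification pass (alternative decomposition).

-- ===== PORT A =====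
def summarize_compact_delta (previous_globals : Option (List Int)) (selected_globals : List Int) : List (String × Int) :=
  let previous : PySem.Set Int := PySem.Set.ofList (previous_globals.getD [])
  let current : PySem.Set Int := PySem.Set.ofList selected_globals
  [("added_expert_total", PySem.Set.len (PySem.Set.diff current previous)),
   ("removed_expert_total", PySem.Set.len (PySem.Set.diff previous current)),
   ("reused_expert_total", PySem.Set.len (PySem.Set.inter previous current))]

-- ===== PORT B =====
def summarize_compact_delta_alt (previous_globals : Option (List Int)) (selected_globals : List Int) : List (String × Int) :=
  let flags1 : PySem.Dict Int Int :=
    (previous_globals.getD []).foldl (fun d v => d.insert v 1) PySem.Dict.empty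
  let flags : PySem.Dict Int Int :=
    selected_globals.foldl (fun d v => d.insert v (if (d.getD v 0) % 2 == 1 then 3 else 2)) flags1
  let t : Int × Int × Int :=
    flags.values.foldl (fun t m =>
      if m = 3 then (t.1, t.2.1, t.2.2 + 1)
      else if m = 2 then (t.1 + 1, t.2.1, t.2.2)
      else (t.1, t.2.1 + 1, t.2.2)) (0, 0, 0)
  [("added_expert_total", t.1), ("removed_expert_total", t.2.1), ("reused_expert_total", t.2.2)]

-- ===== PRECONDITION & SPEC =====
def Spec_summarize_compact_delta (previous_globals : Option (List Int)) (selected_globals : List Int) (out : List (String × Int)) : Prop := out = summarize_compact_delta_alt previous_globals selected_globals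
instance (previous_globals : Option (List Int)) (selected_globals : List Int) (out : List (String × Int)) : Decidable (Spec_summarize_compact_delta previous_globals selected_globals out) := by unfold Spec_summarize_compact_delta; infer_instance

-- ===== CLAIM (what is proved, stated in full; the proofs are below) =====
def Claim_equal_summarize_compact_delta : Prop := ∀ (previous_globals : Option (List Int)) (selected_globals : List Int), Dom_summarize_compact_delta previous_globals selected_globals → Spec_summarize_compact_delta previous_globals selected_globals (summarize_compact_delta previous_globals selected_globals)

-- ===== LEMMAS AND PROOFS =====

-- A fold of idempotent re-inserts: the final value at k is f applied once to the initial value.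
theorem pv_fold_getD (f : Int → Int) (hf : ∀ x, f (f x) = f x) :
    ∀ (l : List Int) (d : PySem.Dict Int Int) (k : Int),
      (l.foldl (fun d v => d.insert v (f (d.getD v 0))) d).getD k 0
        = if k ∈ l then f (d.getD k 0) else d.getD k 0 := by
  intro l
  induction l with
  | nil => intro d k; simp
  | cons x l ih =>
      intro d k
      rw [List.foldl_cons, ih]
      rw [PySem.Dict.getD_insert]
      by_cases hk : k = x
      · subst hk
        by_cases hl : k ∈ l <;> simp [hl, hf]
      · by_cases hl : k ∈ l <;> simp [hk, hl, List.mem_cons]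

-- The tally fold counts occurrences of 2, "neither 3 nor 2", and 3.
theorem pv_tally (vs : List Int) : ∀ (a r u : Int),
    vs.foldl (fun t m =>
      if m = 3 then (t.1, t.2.1, t.2.2 + 1)
      else if m = 2 then (t.1 + 1, t.2.1, t.2.2)
      else (t.1, t.2.1 + 1, t.2.2)) ((a, r, u) : Int × Int × Int)
    = (a + (vs.countP (fun m => decide (m = 2)) : Int),
       r + (vs.countP (fun m => !(decide (m = 3)) && !(decide (m = 2))) : Int),
       u + (vs.countP (fun m => decide (m = 3)) : Int)) := by
  induction vs with
  | nil => intro a r u; simp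
  | cons m vs ih =>
      intro a r u
      rw [List.foldl_cons]
      by_cases h3 : m = 3
      · rw [if_pos h3, ih]
        refine Prod.ext ?_ (Prod.ext ?_ ?_) <;> simp [h3] <;> ring
      · by_cases h2 : m = 2
        · rw [if_neg h3, if_pos h2, ih]
          refine Prod.ext ?_ (Prod.ext ?_ ?_) <;> simp [h3, h2] <;> ring
        · rw [if_neg h3, if_neg h2, ih]
          refine Prod.ext ?_ (Prod.ext ?_ ?_) <;> simp [h3, h2] <;> ring

-- Value held by the flags dict at key k, in closed form.
theorem pv_flags_getD (pl sl : List Int) :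
    ∀ k, ((sl.foldl (fun d v => d.insert v (if (d.getD v 0) % 2 == 1 then 3 else 2))
        (pl.foldl (fun d v => d.insert v 1) PySem.Dict.empty)) : PySem.Dict Int Int).getD k 0
      = if k ∈ sl then (if k ∈ pl then 3 else 2) else (if k ∈ pl then 1 else 0) := by
  intro k
  have h1 : ∀ j, ((pl.foldl (fun d v => d.insert v 1) PySem.Dict.empty) : PySem.Dict Int Int).getD j 0
      = if j ∈ pl then 1 else 0 := by
    intro j
    have := pv_fold_getD (fun _ => 1) (fun _ => rfl) pl PySem.Dict.empty j
    simpa using this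
  have h2 := pv_fold_getD (fun x => if x % 2 == 1 then 3 else 2)
      (by intro x; by_cases h : x % 2 == 1 <;> simp [h]) sl
      (pl.foldl (fun d v => d.insert v 1) PySem.Dict.empty) k
  rw [h2, h1]
  by_cases hs : k ∈ sl <;> by_cases hp : k ∈ pl <;> simp [hs, hp]

theorem summarize_compact_delta_spec_aux (previous_globals : Option (List Int)) (selected_globals : List Int) :
    summarize_compact_delta previous_globals selected_globals
      = summarize_compact_delta_alt previous_globals selected_globals := by
  simp only [summarize_compact_delta, summarize_compact_delta_alt]
  set pl := previous_globals.getD [] with hpl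
  set sl := selected_globals with hsl
  set P : PySem.Set Int := PySem.Set.ofList pl with hP
  set C : PySem.Set Int := PySem.Set.ofList sl with hC
  set flags1 : PySem.Dict Int Int := pl.foldl (fun d v => d.insert v 1) PySem.Dict.empty with hflags1
  set flags : PySem.Dict Int Int :=
    sl.foldl (fun d v => d.insert v (if (d.getD v 0) % 2 == 1 then 3 else 2)) flags1 with hflags
  -- keys of the flags dict: previous values first, then the new selected values
  have hkeys1 : flags1.keys = P := by
    rw [hflags1]
    have := PySem.Dict.keys_foldl_insert (ν := Int) pl (fun _ _ => 1) PySem.Dict.empty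
    simpa [PySem.Set.update_nil_left] using this
  have hkeys : flags.keys = P ++ PySem.Set.diff C P := by
    rw [hflags]
    have := PySem.Dict.keys_foldl_insert (ν := Int) sl
      (fun d v => if (d.getD v 0) % 2 == 1 then 3 else 2) flags1
    rw [this, hkeys1, PySem.Set.update_eq_append_filter]
    rfl
  have hnodup : flags.keys.Nodup := by
    rw [hflags]
    apply PySem.Dict.nodup_keys_foldl_insert
    rw [hkeys1, hP]
    exact PySem.Set.nodup_ofList pl
  have hval : flags.values = flags.keys.map (fun k => flags.getD k 0) :=
    PySem.Dict.values_eq_map_keys flags hnodup 0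
  have hget : ∀ k, flags.getD k 0
      = if k ∈ sl then (if k ∈ pl then 3 else 2) else (if k ∈ pl then 1 else 0) := by
    rw [hflags, hflags1]; exact pv_flags_getD pl sl
  -- run the tally
  rw [pv_tally, hval, hkeys]
  simp only [List.countP_map, List.countP_append, zero_add, List.cons.injEq, Prod.mk.injEq,
    and_true, true_and]
  -- facts about membership in the two key segments
  have hmemP : ∀ k, k ∈ P → k ∈ pl := by
    intro k hk; rw [hP] at hk; exact (PySem.Set.mem_ofList _ _).mp hk
  have hmemD : ∀ k, k ∈ PySem.Set.diff C P → k ∈ sl ∧ k ∉ pl := by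
    intro k hk
    rw [PySem.Set.mem_diff] at hk
    refine ⟨(PySem.Set.mem_ofList _ _).mp (hC ▸ hk.1), fun hkp => hk.2 ?_⟩
    rw [hP]; exact (PySem.Set.mem_ofList _ _).mpr hkp
  refine ⟨?_, ?_, ?_⟩
  -- added = |C - P|
  · have h0 : P.countP ((fun m => decide (m = 2)) ∘ fun k => flags.getD k 0) = 0 := by
      rw [List.countP_eq_zero]
      intro k hk
      have hkp := hmemP k hk
      by_cases hs : k ∈ sl <;> simp [Function.comp, hget, hkp, hs]
    have hlen : (PySem.Set.diff C P).countP ((fun m => decide (m = 2)) ∘ fun k => flags.getD k 0)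
        = (PySem.Set.diff C P).length := by
      rw [List.countP_eq_length]
      intro k hk
      obtain ⟨hs, hp⟩ := hmemD k hk
      simp [Function.comp, hget, hs, hp]
    rw [h0, hlen]
    simp [PySem.Set.len]
  -- removed = |P - C|
  · have h0 : (PySem.Set.diff C P).countP
        ((fun m => !(decide (m = 3)) && !(decide (m = 2))) ∘ fun k => flags.getD k 0) = 0 := by
      rw [List.countP_eq_zero]
      intro k hk
      obtain ⟨hs, hp⟩ := hmemD k hk
      simp [Function.comp, hget, hs, hp]
    have hPc : P.countP ((fun m => !(decide (m = 3)) && !(decide (m = 2))) ∘ fun k => flags.getD k 0)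
        = P.countP (fun k => !(C.contains k)) := by
      apply List.countP_congr
      intro k hk
      have hkp := hmemP k hk
      by_cases hs : k ∈ sl <;>
        simp [Function.comp, hget, hkp, hs, PySem.Set.contains_eq_listContains, hC,
          PySem.Set.mem_ofList]
    rw [h0, hPc]
    simp [PySem.Set.len, PySem.Set.diff, List.countP_eq_length_filter]
  -- reused = |P ∩ C|
  · have h0 : (PySem.Set.diff C P).countP ((fun m => decide (m = 3)) ∘ fun k => flags.getD k 0) = 0 := by
      rw [List.countP_eq_zero]
      intro k hk
      obtain ⟨hs, hp⟩ := hmemD k hk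
      simp [Function.comp, hget, hs, hp]
    have hPc : P.countP ((fun m => decide (m = 3)) ∘ fun k => flags.getD k 0)
        = P.countP (fun k => C.contains k) := by
      apply List.countP_congr
      intro k hk
      have hkp := hmemP k hk
      by_cases hs : k ∈ sl <;>
        simp [Function.comp, hget, hkp, hs, PySem.Set.contains_eq_listContains, hC,
          PySem.Set.mem_ofList]
    rw [h0, hPc]
    simp [PySem.Set.len, PySem.Set.inter, List.countP_eq_length_filter]

-- ===== VERDICT (by name: the statement is the Claim_ definition above) =====
theorem summarize_compact_delta_spec : Claim_equal_summarize_compact_delta := by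
  intro pg sg _
  exact summarize_compact_delta_spec_aux pg sg
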